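-- pv_equiv track=rewrite | github.com/RationalityEnhancement/MCRL | experiments/bin/define_envs.py | n_step
-- ===== SOURCE A (Python) =====
-- def n_step(graph):
--     """Number of steps it takes to reach every state."""
--     result = {}
--     def search(s, n):
--         result[s] = n
--         for _, s1 in graph[s].values():
--             search(s1, n+1)
--     search('0', 0)
--     return result
-- ===== SOURCE B (Python) =====
-- def n_step(graph):
--     """Number of steps it takes to reach every state."""
--     result = {}
--     stack = [('0', 0)]
--     while stack:
--         s, n = stack.pop()
--         result[s] = n
--         for _, s1 in reversed(list(graph[s].values())):
--             stack.append((s1, n + 1))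
--     return result
-- ===== Notes on version B (the rewrite author's own statement) =====
-- stated objective: alternative
-- what changed: The recursive DFS with a mutated closure dict is replaced by an explicit stack loop (pop a (state, depth) pair, write it, push the children depth+1 in reversed order), which reproduces the same preorder last-write-wins depths without Python recursion.
import Mathlib
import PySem

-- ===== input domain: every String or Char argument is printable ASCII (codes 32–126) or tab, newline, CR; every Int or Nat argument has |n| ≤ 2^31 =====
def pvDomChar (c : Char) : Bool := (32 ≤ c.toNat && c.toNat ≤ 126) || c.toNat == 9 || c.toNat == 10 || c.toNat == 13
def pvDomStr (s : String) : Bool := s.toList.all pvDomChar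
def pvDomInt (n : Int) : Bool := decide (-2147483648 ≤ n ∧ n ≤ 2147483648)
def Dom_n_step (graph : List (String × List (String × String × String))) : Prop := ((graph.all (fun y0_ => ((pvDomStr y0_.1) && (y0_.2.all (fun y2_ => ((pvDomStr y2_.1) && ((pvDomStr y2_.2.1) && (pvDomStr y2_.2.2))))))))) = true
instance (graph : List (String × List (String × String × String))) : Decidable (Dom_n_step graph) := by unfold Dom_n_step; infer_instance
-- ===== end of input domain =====

-- B replaces A's recursive DFS by an explicit stack loop with reversed child pushes (same preorder,
-- same last-write-wins depths). Note: A mutates only its local dict, no argument mutation.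

-- ===== PORT A =====
-- graph[s]: first-match lookup in the association list (Python dict lookup; generated dicts have unique keys)
def lookupG : List (String × List (String × String × String)) → String → Option (List (String × String × String))
  | [], _ => none
  | (k, v) :: rest, s => if k = s then some v else lookupG rest s

-- the inner 'search(s, n)': 'result[s] = n' then recurse into the children.  The Nat fuel is only a
-- totality guard (Python recursion has none); under Pre_ the depth never reaches it (proved below).
-- On a missing key Python raises KeyError AFTER the write; 'none => r' keeps the port total there (outside Pre_).
def goA (graph : List (String × List (String × String × String))) :
    Nat → String → Int → PySem.Dict String Int → PySem.Dict String Int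
  | 0, _, _, r => r
  | d + 1, s, n, r =>
    let r := r.insert s n
    match lookupG graph s with
    | none => r
    | some es => es.foldl (fun acc e => goA graph d e.2.2 (n + 1) acc) r

def n_step (graph : List (String × List (String × String × String))) : List (String × Int) :=
  (goA graph (graph.length + 1) "0" 0 PySem.Dict.empty).items

-- ===== PORT B =====
-- pop count of B's loop under depth fuel d (computed only to serve as goB's totality fuel)
def cntB (graph : List (String × List (String × String × String))) : Nat → String → Nat
  | 0, _ => 0
  | d + 1, s =>
    match lookupG graph s with
    | none => 1
    | some es => 1 + (es.map (fun e => cntB graph d e.2.2)).sum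

-- the while-stack loop of Source B; the list head is the stack top, so Python's
-- 'append the children reversed' is 'prepend the children in order' here.
-- The Nat fuel (one unit per pop) is only a totality guard; under Pre_ it suffices (proved below).
def goB (graph : List (String × List (String × String × String))) :
    Nat → List (String × Int) → PySem.Dict String Int → PySem.Dict String Int
  | _, [], r => r
  | 0, _ :: _, r => r
  | k + 1, (s, n) :: rest, r =>
    let r := r.insert s n
    match lookupG graph s with
    | none => r
    | some es => goB graph k (es.map (fun e => (e.2.2, n + 1)) ++ rest) r

def n_step_alt (graph : List (String × List (String × String × String))) : List (String × Int) :=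
  (goB graph (cntB graph (graph.length + 1) "0") [("0", 0)] PySem.Dict.empty).items

-- ===== PRECONDITION & SPEC =====
-- targets of the out-edges of s
def pyTgts (graph : List (String × List (String × String × String))) (s : String) : List String :=
  ((graph.find? (fun p => p.1 = s)).map (fun p => p.2.map (fun e => e.2.2))).getD []

def pvStep (graph : List (String × List (String × String × String))) (S : List String) : List String :=
  (S ++ S.flatMap (pyTgts graph)).dedup

def pvIter (graph : List (String × List (String × String × String))) : Nat → List String → List String
  | 0, S => S
  | k + 1, S => pvIter graph k (pvStep graph S)

def pvK (graph : List (String × List (String × String × String))) : Nat :=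
  (graph.flatMap (fun p => p.2)).length + 2

-- the states reachable from '0' (pvK iterations saturate the step image)
def pvReach (graph : List (String × List (String × String × String))) : List String :=
  pvIter graph (pvK graph) ["0"]

-- Pre_: exactly the inputs on which A's DFS returns: every state reachable from '0' is a key of the
-- graph (else Python raises KeyError) and no reachable state lies on a cycle (else RecursionError).
def Pre_n_step (graph : List (String × List (String × String × String))) : Prop :=
  (∀ s ∈ pvReach graph, s ∈ graph.map Prod.fst) ∧
  (∀ s ∈ pvReach graph, s ∉ pvIter graph (pvK graph) (pyTgts graph s).dedup)

instance (graph : List (String × List (String × String × String))) : Decidable (Pre_n_step graph) := by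
  unfold Pre_n_step; infer_instance

def pvWitness_n_step : (List (String × List (String × String × String))) :=
  [("0", [("a", "x", "1")]), ("1", [])]

def Spec_n_step (graph : List (String × List (String × String × String))) (out : List (String × Int)) : Prop :=
  out = n_step_alt graph

instance (graph : List (String × List (String × String × String))) (out : List (String × Int)) :
    Decidable (Spec_n_step graph out) := by unfold Spec_n_step; infer_instance

-- ===== CLAIM (what is proved, stated in full; the proofs are below) =====
def Claim_equal_n_step : Prop :=
  ∀ (graph : List (String × List (String × String × String))),
    Dom_n_step graph → Pre_n_step graph → Spec_n_step graph (n_step graph)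

-- ===== LEMMAS AND PROOFS =====

-- the edge relation of the graph
def edgeG (g : List (String × List (String × String × String))) (a b : String) : Prop :=
  b ∈ pyTgts g a

-- A's DFS from s completes within depth fuel d with every lookup succeeding
def okA (g : List (String × List (String × String × String))) : Nat → String → Bool
  | 0, _ => false
  | d + 1, s =>
    match lookupG g s with
    | none => false
    | some es => es.all (fun e => okA g d e.2.2)

lemma find?_eq_lookupG (g : List (String × List (String × String × String))) (s : String) :
    g.find? (fun p => p.1 = s) = (lookupG g s).map (Prod.mk s) := by
  induction g with
  | nil => rfl
  | cons p rest ih =>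
    obtain ⟨k, v⟩ := p
    by_cases hk : k = s
    · subst hk
      simp [lookupG, List.find?_cons_of_pos]
    · rw [List.find?_cons_of_neg (by simpa using hk)]
      simp [lookupG, hk, ih]

lemma pyTgts_eq (g : List (String × List (String × String × String))) (s : String) :
    pyTgts g s = match lookupG g s with
      | none => []
      | some es => es.map (fun e => e.2.2) := by
  rw [pyTgts, find?_eq_lookupG]
  cases lookupG g s <;> rfl

lemma lookupG_isSome_iff_mem {g : List (String × List (String × String × String))} {s : String} :
    (lookupG g s).isSome = true ↔ s ∈ g.map Prod.fst := by
  induction g with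
  | nil => simp [lookupG]
  | cons p rest ih =>
    obtain ⟨k, v⟩ := p
    by_cases hk : k = s
    · subst hk
      simp [lookupG]
    · simp [lookupG, hk, ih, Ne.symm hk]

def allT (g : List (String × List (String × String × String))) : List String :=
  (g.flatMap (fun p => p.2)).map (fun e => e.2.2)

def ClosedG (g : List (String × List (String × String × String))) (T : List String) : Prop :=
  ∀ s ∈ T, ∀ t ∈ pyTgts g s, t ∈ T

def Tset (g : List (String × List (String × String × String))) (s : String) : List String :=
  pvIter g (pvK g) (pyTgts g s).dedup

lemma nodup_length_le {l l' : List String} (h : l.Nodup) (hs : l ⊆ l') : l.length ≤ l'.length := by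
  calc l.length = l.toFinset.card := (List.toFinset_card_of_nodup h).symm
    _ ≤ l'.toFinset.card := Finset.card_le_card (fun x hx => List.mem_toFinset.mpr (hs (List.mem_toFinset.mp hx)))
    _ ≤ l'.length := l'.toFinset_card_le

lemma mem_pvStep {g : List (String × List (String × String × String))} {S : List String} {x : String} :
    x ∈ pvStep g S ↔ x ∈ S ∨ ∃ s ∈ S, x ∈ pyTgts g s := by
  simp [pvStep]

lemma subset_pvStep (g : List (String × List (String × String × String))) (S : List String) :
    S ⊆ pvStep g S := fun _ hx => mem_pvStep.mpr (Or.inl hx)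

lemma nodup_pvStep (g : List (String × List (String × String × String))) (S : List String) :
    (pvStep g S).Nodup := List.nodup_dedup _

lemma pvIter_succ_out (g : List (String × List (String × String × String))) (k : Nat) (S : List String) :
    pvIter g (k + 1) S = pvStep g (pvIter g k S) := by
  induction k generalizing S with
  | zero => rfl
  | succ k ih =>
    show pvIter g (k + 1) (pvStep g S) = _
    rw [ih]
    rfl

lemma subset_pvIter (g : List (String × List (String × String × String))) (k : Nat) (S : List String) :
    S ⊆ pvIter g k S := by
  induction k generalizing S with
  | zero => exact fun _ h => h
  | succ k ih => exact fun x hx => ih (pvStep g S) (subset_pvStep g S hx)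

lemma closed_ext {g : List (String × List (String × String × String))} {T T' : List String}
    (hm : ∀ x, x ∈ T ↔ x ∈ T') (h : ClosedG g T) : ClosedG g T' :=
  fun s hs t ht => (hm t).mp (h s ((hm s).mpr hs) t ht)

lemma mem_pvStep_of_closed {g : List (String × List (String × String × String))} {T : List String}
    (h : ClosedG g T) : ∀ x, x ∈ pvStep g T ↔ x ∈ T := by
  intro x
  rw [mem_pvStep]
  constructor
  · rintro (hx | ⟨s, hs, hx⟩)
    · exact hx
    · exact h s hs x hx
  · exact Or.inl

lemma closed_pvIter_of_closed {g : List (String × List (String × String × String))} {T : List String}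
    (h : ClosedG g T) (k : Nat) : ClosedG g (pvIter g k T) := by
  induction k generalizing T with
  | zero => exact h
  | succ k ih =>
    exact ih (closed_ext (fun x => (mem_pvStep_of_closed h x).symm) h)

lemma length_lt_of_not_closed {g : List (String × List (String × String × String))} {T : List String}
    (hn : T.Nodup) (h : ¬ ClosedG g T) : T.length < (pvStep g T).length := by
  unfold ClosedG at h
  push Not at h
  obtain ⟨s, hs, t, ht, htT⟩ := h
  have hsub : (t :: T) ⊆ pvStep g T := by
    intro x hx
    rcases List.mem_cons.mp hx with rfl | hx'
    · exact mem_pvStep.mpr (Or.inr ⟨s, hs, ht⟩)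
    · exact subset_pvStep g T hx'
  have := nodup_length_le (List.nodup_cons.mpr ⟨htT, hn⟩) hsub
  simpa using this

lemma lookupG_mem {g : List (String × List (String × String × String))} {s : String}
    {es : List (String × String × String)} (h : lookupG g s = some es) : (s, es) ∈ g := by
  induction g with
  | nil => simp [lookupG] at h
  | cons p rest ih =>
    obtain ⟨k, v⟩ := p
    by_cases hk : k = s
    · subst hk
      simp [lookupG] at h
      subst h
      exact List.mem_cons_self ..
    · simp [lookupG, hk] at h
      exact List.mem_cons_of_mem _ (ih h)

lemma tgts_subset_allT (g : List (String × List (String × String × String))) (s : String) :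
    pyTgts g s ⊆ allT g := by
  rw [pyTgts_eq]
  cases hl : lookupG g s with
  | none => simp
  | some es =>
    intro x hx
    obtain ⟨e, he, rfl⟩ := List.mem_map.mp hx
    exact List.mem_map_of_mem (List.mem_flatMap.mpr ⟨(s, es), lookupG_mem hl, he⟩)

lemma pvStep_subset_of {g : List (String × List (String × String × String))} {S U : List String}
    (hS : S ⊆ U) (hU : allT g ⊆ U) : pvStep g S ⊆ U := by
  intro x hx
  rcases mem_pvStep.mp hx with hx' | ⟨s, _, hx'⟩
  · exact hS hx'
  · exact hU (tgts_subset_allT g s hx')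

lemma closed_pvIter {g : List (String × List (String × String × String))} :
    ∀ (K : Nat) {S U : List String}, S ⊆ U → S.Nodup → allT g ⊆ U → U.length < S.length + K →
      ClosedG g (pvIter g K S) := by
  intro K
  induction K with
  | zero =>
    intro S U hS hn _ hK
    exact absurd (nodup_length_le hn hS) (by omega)
  | succ K ih =>
    intro S U hS hn hU hK
    by_cases hc : ClosedG g S
    · exact closed_pvIter_of_closed hc (K + 1)
    · show ClosedG g (pvIter g K (pvStep g S))
      exact ih (pvStep_subset_of hS hU) (nodup_pvStep g S) hU
        (by have := length_lt_of_not_closed hn hc; omega)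

lemma allT_length (g : List (String × List (String × String × String))) :
    (allT g).length = (g.flatMap (fun p => p.2)).length := by
  simp [allT]

lemma closed_reach (g : List (String × List (String × String × String))) :
    ClosedG g (pvReach g) := by
  apply closed_pvIter (pvK g) (U := "0" :: allT g)
  · intro x hx
    simp at hx
    simp [hx]
  · simp
  · exact fun x hx => List.mem_cons_of_mem _ hx
  · simp [pvK, allT_length]
    omega

lemma closed_T (g : List (String × List (String × String × String))) (s : String) :
    ClosedG g (Tset g s) := by
  apply closed_pvIter (pvK g) (U := allT g)
  · exact fun x hx => tgts_subset_allT g s (List.mem_dedup.mp hx)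
  · exact List.nodup_dedup _
  · exact fun x hx => hx
  · simp [pvK, allT_length]
    omega

lemma tgts_subset_T (g : List (String × List (String × String × String))) (s : String) :
    pyTgts g s ⊆ Tset g s :=
  fun _ hx => subset_pvIter g (pvK g) _ (List.mem_dedup.mpr hx)

lemma zero_mem_reach (g : List (String × List (String × String × String))) :
    "0" ∈ pvReach g :=
  subset_pvIter g (pvK g) _ (List.mem_singleton.mpr rfl)

lemma rtg_mem {g : List (String × List (String × String × String))} {T : List String} {a b : String}
    (hc : ClosedG g T) (ha : a ∈ T) (h : Relation.ReflTransGen (edgeG g) a b) : b ∈ T := by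
  induction h with
  | refl => exact ha
  | tail _ h₂ ih => exact hc _ ih _ h₂

lemma no_cycle {g : List (String × List (String × String × String))} (hpre : Pre_n_step g)
    {s t : String} (hs : s ∈ pvReach g) (hst : edgeG g s t)
    (hrtg : Relation.ReflTransGen (edgeG g) t s) : False := by
  have htR : t ∈ pvReach g := closed_reach g s hs t hst
  have htT : t ∈ Tset g t := by
    rcases Relation.ReflTransGen.cases_head hrtg with heq | ⟨w, hw, hws⟩
    · subst heq
      exact tgts_subset_T g t hst
    · have hwT : w ∈ Tset g t := tgts_subset_T g t hw
      have hsT : s ∈ Tset g t := rtg_mem (closed_T g t) hwT hws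
      exact closed_T g t s hsT t hst
  exact hpre.2 t htR htT

lemma reach_nodup (g : List (String × List (String × String × String))) : (pvReach g).Nodup := by
  have hK : pvK g = (pvK g - 1) + 1 := by
    unfold pvK
    omega
  rw [pvReach, hK, pvIter_succ_out]
  exact nodup_pvStep g _

lemma reach_length {g : List (String × List (String × String × String))} (hpre : Pre_n_step g) :
    (pvReach g).length ≤ g.length := by
  have h := nodup_length_le (reach_nodup g) (fun x hx => hpre.1 x hx)
  simpa using h

lemma okA_of {g : List (String × List (String × String × String))} (hpre : Pre_n_step g) :
    ∀ (d : Nat) (P : List String) (s : String),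
      (s :: P).Nodup → (∀ p ∈ s :: P, p ∈ pvReach g) →
      (∀ p ∈ P, Relation.ReflTransGen (edgeG g) p s) →
      d + P.length = g.length + 1 → okA g d s = true := by
  intro d
  induction d with
  | zero =>
    intro P s hnd hR _ hc
    have h1 : (s :: P).length ≤ (pvReach g).length := nodup_length_le hnd hR
    have h2 := reach_length hpre
    simp at h1
    omega
  | succ d ih =>
    intro P s hnd hR hrtg hc
    have hsR : s ∈ pvReach g := hR s (List.mem_cons_self ..)
    obtain ⟨es, hes⟩ := Option.isSome_iff_exists.mp (lookupG_isSome_iff_mem.mpr (hpre.1 s hsR))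
    simp only [okA, hes, List.all_eq_true]
    intro e he
    have htg : e.2.2 ∈ pyTgts g s := by
      rw [pyTgts_eq, hes]
      exact List.mem_map_of_mem he
    have htR : e.2.2 ∈ pvReach g := closed_reach g s hsR _ htg
    have htP : e.2.2 ∉ s :: P := by
      intro hmem
      have hts : Relation.ReflTransGen (edgeG g) e.2.2 s := by
        rcases List.mem_cons.mp hmem with heq | hp
        · rw [heq]
        · exact hrtg _ hp
      exact no_cycle hpre hsR htg hts
    apply ih (s :: P) e.2.2
    · exact List.nodup_cons.mpr ⟨htP, hnd⟩
    · intro p hp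
      rcases List.mem_cons.mp hp with rfl | hp'
      · exact htR
      · exact hR p hp'
    · intro p hp
      rcases List.mem_cons.mp hp with rfl | hp'
      · exact Relation.ReflTransGen.single htg
      · exact (hrtg p hp').tail htg
    · simp
      omega

lemma okA_top {g : List (String × List (String × String × String))} (hpre : Pre_n_step g) :
    okA g (g.length + 1) "0" = true := by
  apply okA_of hpre (g.length + 1) [] "0"
  · simp
  · intro p hp
    rw [List.mem_singleton.mp hp]
    exact zero_mem_reach g
  · simp
  · simp

lemma goB_nil (g : List (String × List (String × String × String))) (k : Nat)
    (r : PySem.Dict String Int) : goB g k [] r = r := by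
  cases k <;> rfl

lemma simB {g : List (String × List (String × String × String))} :
    ∀ (d : Nat) (s : String), okA g d s = true →
      ∀ (n : Int) (rest : List (String × Int)) (r : PySem.Dict String Int) (k : Nat),
        goB g (cntB g d s + k) ((s, n) :: rest) r = goB g k rest (goA g d s n r) := by
  intro d
  induction d with
  | zero =>
    intro s h
    simp [okA] at h
  | succ d ih =>
    intro s h n rest r k
    cases hes : lookupG g s with
    | none => simp [okA, hes] at h
    | some es =>
      simp only [okA, hes, List.all_eq_true] at h
      have hcnt : cntB g (d + 1) s = 1 + (es.map (fun e => cntB g d e.2.2)).sum := by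
        simp [cntB, hes]
      have hgoA : goA g (d + 1) s n r
          = es.foldl (fun acc e => goA g d e.2.2 (n + 1) acc) (r.insert s n) := by
        simp [goA, hes]
      rw [hcnt, hgoA, show 1 + (es.map (fun e => cntB g d e.2.2)).sum + k
            = ((es.map (fun e => cntB g d e.2.2)).sum + k) + 1 by omega]
      have hstep : goB g (((es.map (fun e => cntB g d e.2.2)).sum + k) + 1) ((s, n) :: rest) r
          = goB g ((es.map (fun e => cntB g d e.2.2)).sum + k)
              (es.map (fun e => (e.2.2, n + 1)) ++ rest) (r.insert s n) := by
        simp [goB, hes]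
      rw [hstep]
      have haux : ∀ (l : List (String × String × String)), (∀ e ∈ l, okA g d e.2.2 = true) →
          ∀ (rest : List (String × Int)) (r : PySem.Dict String Int) (k : Nat),
            goB g ((l.map (fun e => cntB g d e.2.2)).sum + k)
                (l.map (fun e => (e.2.2, n + 1)) ++ rest) r
              = goB g k rest (l.foldl (fun acc e => goA g d e.2.2 (n + 1) acc) r) := by
        intro l
        induction l with
        | nil =>
          intro _ rest r k
          simp
        | cons e l ihl =>
          intro hl rest r k
          have h1 : okA g d e.2.2 = true := hl e (List.mem_cons_self ..)
          have h2 : ∀ x ∈ l, okA g d x.2.2 = true := fun x hx => hl x (List.mem_cons_of_mem _ hx)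
          simp only [List.map_cons, List.sum_cons, List.cons_append, List.foldl_cons]
          rw [show cntB g d e.2.2 + (l.map (fun e => cntB g d e.2.2)).sum + k
                = cntB g d e.2.2 + ((l.map (fun e => cntB g d e.2.2)).sum + k) by omega]
          rw [ih e.2.2 h1 (n + 1) (l.map (fun e => (e.2.2, n + 1)) ++ rest) r _]
          exact ihl h2 rest (goA g d e.2.2 (n + 1) r) k
      exact haux es h rest (r.insert s n) k

-- ===== VERDICT (by name: the statement is the Claim_ definition above) =====
theorem n_step_spec : Claim_equal_n_step := by
  intro g _ hpre
  unfold Spec_n_step n_step n_step_alt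
  have h := simB (g := g) (g.length + 1) "0" (okA_top hpre) 0 [] PySem.Dict.empty 0
  rw [Nat.add_zero] at h
  rw [h, goB_nil]
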